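-- pv_equiv track=rewrite | github.com/kimyura29/Algorithm-Study | 백준/Silver/2503. 숫자 야구/숫자 야구.py | baseball
-- ===== SOURCE A (Python) =====
-- def baseball(hints):
--     count = []
--     for answer in range(123,988): # 987까지 포함
--         answer_str = str(answer)
--         if '0' in str(answer) or len(set(str(answer))) !=3:
--             continue # 건너뛰기
--
--         # 후보마다 number, s, b 검사
--         is_possible=True
--         for number, s, b in hints:
--             number = str(number)
--             # 스트라이크 개수 세기
--             strike = 0
--             for i in range(3):
--                 if answer_str[i] == number[i]:
--                     strike += 1
--             # 볼 개수 세기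
--             ball = 0
--             for i in range(3):
--                 if answer_str[i] != number[i] and answer_str[i] in number:
--                     ball += 1
--             # 만일 하나라도 조건에 맞지 않다면
--             if strike != s or ball != b:
--                 is_possible = False
--                 break
--         # 여러 hint중 조건이 맞다면 count에 추가
--         if is_possible:
--             count.append(answer)
--
--     return len(count)
-- ===== SOURCE B (Python) =====
-- def _consistent(number, s, b):
--     """Set of 3-digit candidates (distinct digits 1-9, as strings) consistent
--     with the hint, built by a pruned DFS that classifies each chosen digit as
--     strike / ball / miss against the hint string."""
--     ns = str(number)
--     out = set()
--
--     def rec(i, s, b, cand):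
--         if s < 0 or b < 0:
--             return
--         if i == 3:
--             if s == 0 and b == 0:
--                 out.add(cand)
--             return
--         for d in '123456789':
--             if d in cand:
--                 continue
--             if d == ns[i]:
--                 rec(i + 1, s - 1, b, cand + d)
--             elif d in ns:
--                 rec(i + 1, s, b - 1, cand + d)
--             else:
--                 rec(i + 1, s, b, cand + d)
--
--     rec(0, s, b, '')
--     return out
--
--
-- def baseball(hints):
--     result = None
--     for number, s, b in hints:
--         cands = _consistent(number, s, b)
--         result = cands if result is None else result & cands
--         if not result:
--             return 0  # intersection already empty: no later hint can revive it
--     if result is None: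
--         return 9 * 8 * 7  # no hints: every distinct-nonzero-digit candidate works
--     return len(result)
-- ===== Notes on version B (the rewrite author's own statement) =====
-- stated objective: alternative
-- what changed: Instead of enumerating all 865 numbers and testing each against every hint, B builds for each hint the set of consistent candidates directly by a pruned DFS that classifies each placed digit as strike/ball/miss, intersects the per-hint sets, and returns 0 as soon as the intersection is empty (empty hint list gives the permutation count 9*8*7).
-- outside the precondition, e.g. on baseball([(123, 1, 2), (124, 3, 0), (5, 0, 0)]): A returns 0, B returns 0
import Mathlib
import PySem

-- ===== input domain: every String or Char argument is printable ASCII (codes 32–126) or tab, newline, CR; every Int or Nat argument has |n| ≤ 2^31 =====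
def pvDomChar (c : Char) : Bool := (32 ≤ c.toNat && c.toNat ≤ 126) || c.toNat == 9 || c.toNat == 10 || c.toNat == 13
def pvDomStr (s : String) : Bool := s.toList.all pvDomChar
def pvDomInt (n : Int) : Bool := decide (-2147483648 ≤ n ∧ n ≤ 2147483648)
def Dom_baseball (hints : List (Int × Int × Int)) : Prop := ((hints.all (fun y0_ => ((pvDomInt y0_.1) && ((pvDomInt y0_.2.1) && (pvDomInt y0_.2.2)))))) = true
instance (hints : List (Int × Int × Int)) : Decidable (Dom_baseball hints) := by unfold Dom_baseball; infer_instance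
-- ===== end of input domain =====

-- B replaces A's candidate-major scan (enumerate all numbers, test each against every
-- hint) by a hint-major algorithm: a pruned DFS builds, per hint, the set of candidates
-- consistent with that hint, and the per-hint sets are intersected (objective: alternative).

-- ===== PORT A =====
-- strike loop: for i in range(3): if answer_str[i] == number[i]: strike += 1
def strikeLoopA (ansStr ns : List Char) : Int :=
  (PySem.List.pyRange 0 3 1).foldl
    (fun strike i =>
      if PySem.List.pyGet? ansStr i == PySem.List.pyGet? ns i then strike + 1 else strike) 0

-- ball loop: for i in range(3): if answer_str[i] != number[i] and answer_str[i] in number: ball += 1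
-- ('answer_str[i] in number' is a one-char substring test = PySem.Chars.isIn; none = IndexError, unreachable under Pre_)
def ballLoopA (ansStr ns : List Char) : Int :=
  (PySem.List.pyRange 0 3 1).foldl
    (fun ball i =>
      if !(PySem.List.pyGet? ansStr i == PySem.List.pyGet? ns i)
          && (match PySem.List.pyGet? ansStr i with
              | some ch => PySem.Chars.isIn [ch] ns
              | none => false) then ball + 1 else ball) 0

-- the 'for number, s, b in hints' loop with its break
def hintLoopA (ansStr : List Char) : List (Int × Int × Int) → Bool
  | [] => true
  | (number, s, b) :: rest =>
    let ns := PySem.Int.toChars number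
    if strikeLoopA ansStr ns ≠ s ∨ ballLoopA ansStr ns ≠ b then false
    else hintLoopA ansStr rest

def baseball (hints : List (Int × Int × Int)) : Int :=
  let count : List Int :=
    (PySem.List.pyRange 123 988 1).foldl
      (fun count answer =>
        let answerStr := PySem.Int.toChars answer
        if PySem.Chars.isIn ['0'] answerStr
            || !(PySem.Set.len (PySem.Set.ofList answerStr) == 3) then count
        else if hintLoopA answerStr hints then count ++ [answer] else count) []
  PySem.List.len count

-- ===== PORT B =====
def digitsB : List Char := "123456789".toList

-- rec(i, s, b, cand) of Source B; fuel = 3 - i makes the structural recursion explicit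
-- (every call keeps the invariant fuel = 3 - i, so the fuel-0 fallback is never taken).
def genRec (ns : List Char) : Nat → Int → Int → Int → List Char → PySem.Set (List Char) → PySem.Set (List Char)
  | fuel, i, s, b, cand, out =>
    if s < 0 || b < 0 then out
    else if i == 3 then (if s == 0 && b == 0 then PySem.Set.add out cand else out)
    else
      match fuel with
      | 0 => out
      | n + 1 =>
        digitsB.foldl (fun out d =>
          if PySem.Chars.isIn [d] cand then out
          else if some d == PySem.List.pyGet? ns i then genRec ns n (i+1) (s-1) b (cand ++ [d]) out
          else if PySem.Chars.isIn [d] ns then genRec ns n (i+1) s (b-1) (cand ++ [d]) out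
          else genRec ns n (i+1) s b (cand ++ [d]) out) out

-- the 'for number, s, b in hints' loop of Source B with its 'if not result: return 0' early exit
def altLoop : List (Int × Int × Int) → Option (PySem.Set (List Char)) → Int
  | [], none => 9 * 8 * 7
  | [], some r => PySem.Set.len r
  | h :: t, result =>
    let cands := genRec (PySem.Int.toChars h.1) 3 0 h.2.1 h.2.2 [] PySem.Set.empty
    let r' := match result with
      | none => cands
      | some r => PySem.Set.inter r cands
    if r'.isEmpty then 0 else altLoop t (some r')

def baseball_alt (hints : List (Int × Int × Int)) : Int :=
  altLoop hints none

-- ===== PRECONDITION & SPEC =====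
-- Pre_ excludes hint lists containing a number whose decimal string has fewer than three
-- characters (A's fixed three-index loops raise IndexError on any such hint they reach),
-- unless some earlier hint -- itself and everything before it three characters long -- has
-- an unsatisfiable strike/ball count (outside 0..3 or summing above 3), which kills every
-- candidate before any short hint is reached, so both programs return 0 without touching it;
-- hint lists where only a combination of satisfiable hints blocks a later short hint stay
-- excluded, since whether that accident saves A from the IndexError is not worth claiming.
-- (Pre_ exists for the Pythons' raises; the Lean ports are total, so the proof below does
-- not need it.)
def Pre_baseball (hints : List (Int × Int × Int)) : Prop :=
  (∀ h ∈ hints, 3 ≤ (PySem.Int.toChars h.1).length) ∨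
  (∃ k : Fin hints.length,
    (hints[k].2.1 < 0 ∨ 3 < hints[k].2.1 ∨ hints[k].2.2 < 0 ∨ 3 < hints[k].2.2 ∨
      3 < hints[k].2.1 + hints[k].2.2) ∧
    ∀ h ∈ hints.take (k + 1), 3 ≤ (PySem.Int.toChars h.1).length)
instance (hints : List (Int × Int × Int)) : Decidable (Pre_baseball hints) := by
  unfold Pre_baseball; infer_instance
def pvWitness_baseball : (List (Int × Int × Int)) := [(123, 1, 1)]

def Spec_baseball (hints : List (Int × Int × Int)) (out : Int) : Prop := out = baseball_alt hints
instance (hints : List (Int × Int × Int)) (out : Int) : Decidable (Spec_baseball hints out) := by unfold Spec_baseball; infer_instance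

-- ===== CLAIM (what is proved, stated in full; the proofs are below) =====
def Claim_equal_baseball : Prop := ∀ (hints : List (Int × Int × Int)), Dom_baseball hints → Pre_baseball hints → Spec_baseball hints (baseball hints)

-- ===== LEMMAS AND PROOFS =====

-- strike / ball counts of a candidate suffix placed from hint-string position i on
def sCnt (ns : List Char) (i : Int) : List Char → Int
  | [] => 0
  | d :: e => (if some d == PySem.List.pyGet? ns i then 1 else 0) + sCnt ns (i+1) e

def bCnt (ns : List Char) (i : Int) : List Char → Int
  | [] => 0
  | d :: e =>
    (if !(some d == PySem.List.pyGet? ns i) && PySem.Chars.isIn [d] ns then 1 else 0) + bCnt ns (i+1) e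

-- all length-n extensions of cand by pairwise-distinct digits not in cand, in DFS order
def extsB (cand : List Char) : Nat → List (List Char)
  | 0 => [[]]
  | n + 1 =>
    digitsB.flatMap (fun d =>
      if PySem.Chars.isIn [d] cand then []
      else (extsB (cand ++ [d]) n).map (fun e => d :: e))

def predB (h : Int × Int × Int) (e : List Char) : Bool :=
  sCnt (PySem.Int.toChars h.1) 0 e == h.2.1 && bCnt (PySem.Int.toChars h.1) 0 e == h.2.2

def candE : List (List Char) := extsB [] 3

lemma sCnt_nonneg (ns : List Char) (e : List Char) : ∀ i, 0 ≤ sCnt ns i e := by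
  induction e with
  | nil => intro i; simp [sCnt]
  | cons d e ih => intro i; have := ih (i+1); simp only [sCnt]; split <;> omega

lemma bCnt_nonneg (ns : List Char) (e : List Char) : ∀ i, 0 ≤ bCnt ns i e := by
  induction e with
  | nil => intro i; simp [bCnt]
  | cons d e ih => intro i; have := ih (i+1); simp only [bCnt]; split <;> omega

-- one digit-loop round of the DFS, assuming the inductive hypothesis for smaller fuel
lemma foldGen (ns : List Char) (n : Nat) (i : Int) (hi : i + 1 = 3 - (n : Int))
    (IH : ∀ (s b : Int) (cand : List Char) (out : List (List Char)),
      (∀ x ∈ out, ¬ cand <+: x) →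
      genRec ns n (3 - (n : Int)) s b cand out =
        out ++ (extsB cand n).filterMap (fun e =>
          if sCnt ns (3 - (n : Int)) e == s && bCnt ns (3 - (n : Int)) e == b
          then some (cand ++ e) else none))
    (s b : Int) (cand : List Char) :
    ∀ (ds : List Char), ds.Nodup → ∀ (out : List (List Char)),
      (∀ x ∈ out, ∀ d ∈ ds, ¬ (cand ++ [d]) <+: x) →
      ds.foldl (fun out d =>
          if PySem.Chars.isIn [d] cand then out
          else if some d == PySem.List.pyGet? ns i then genRec ns n (i+1) (s-1) b (cand ++ [d]) out
          else if PySem.Chars.isIn [d] ns then genRec ns n (i+1) s (b-1) (cand ++ [d]) out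
          else genRec ns n (i+1) s b (cand ++ [d]) out) out
      = out ++ ds.flatMap (fun d =>
          if PySem.Chars.isIn [d] cand then []
          else (extsB (cand ++ [d]) n).filterMap (fun e =>
            if sCnt ns i (d :: e) == s && bCnt ns i (d :: e) == b
            then some (cand ++ d :: e) else none)) := by
  intro ds
  induction ds with
  | nil => intro _ out _; simp
  | cons d ds ih =>
    intro hnd out hout
    rw [List.nodup_cons] at hnd
    obtain ⟨hdds, hnd⟩ := hnd
    simp only [List.foldl_cons, List.flatMap_cons]
    cases hdc : PySem.Chars.isIn [d] cand with
    | true =>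
      simp only [if_true]
      rw [ih hnd out (fun x hx d' hd' => hout x hx d' (List.mem_cons_of_mem d hd'))]
      simp
    | false =>
      simp only [Bool.false_eq_true, if_false]
      have houtd : ∀ x ∈ out, ¬ (cand ++ [d]) <+: x :=
        fun x hx => hout x hx d (List.mem_cons_self)
      -- the recursive call appends exactly this hint-shifted block
      have hblock : ∀ (out' : List (List Char)), (∀ x ∈ out', ¬ (cand ++ [d]) <+: x) →
          (if some d == PySem.List.pyGet? ns i then genRec ns n (i+1) (s-1) b (cand ++ [d]) out'
           else if PySem.Chars.isIn [d] ns then genRec ns n (i+1) s (b-1) (cand ++ [d]) out'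
           else genRec ns n (i+1) s b (cand ++ [d]) out')
          = out' ++ (extsB (cand ++ [d]) n).filterMap (fun e =>
              if sCnt ns i (d :: e) == s && bCnt ns i (d :: e) == b
              then some (cand ++ d :: e) else none) := by
        intro out' hout'
        have harr : ∀ e : List Char, cand ++ d :: e = (cand ++ [d]) ++ e := by
          intro e; simp
        cases hstr : (some d == PySem.List.pyGet? ns i) with
        | true =>
          simp only [if_true]
          rw [hi]
          rw [IH (s-1) b (cand ++ [d]) out' hout']
          congr 1
          apply List.filterMap_congr
          intro e _
          have h1 : sCnt ns i (d :: e) = 1 + sCnt ns (i+1) e := by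
            simp [sCnt, hstr]
          have h2 : bCnt ns i (d :: e) = bCnt ns (i+1) e := by
            simp [bCnt, hstr]
          rw [hi] at h1 h2
          rw [h1, h2, harr e]
          have hc : ((1 + sCnt ns (3 - (n:Int)) e == s) : Bool)
              = (sCnt ns (3 - (n:Int)) e == s - 1) := by
            rcases eq_or_ne (sCnt ns (3 - (n:Int)) e) (s - 1) with h | h <;>
              simp [h] <;> omega
          rw [hc]
        | false =>
          cases hin : PySem.Chars.isIn [d] ns with
          | true =>
            simp only [Bool.false_eq_true, if_false, if_true]
            rw [hi]
            rw [IH s (b-1) (cand ++ [d]) out' hout']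
            congr 1
            apply List.filterMap_congr
            intro e _
            have h1 : sCnt ns i (d :: e) = sCnt ns (i+1) e := by
              simp [sCnt, hstr]
            have h2 : bCnt ns i (d :: e) = 1 + bCnt ns (i+1) e := by
              simp [bCnt, hstr, hin]
            rw [hi] at h1 h2
            rw [h1, h2, harr e]
            have hc : ((1 + bCnt ns (3 - (n:Int)) e == b) : Bool)
                = (bCnt ns (3 - (n:Int)) e == b - 1) := by
              rcases eq_or_ne (bCnt ns (3 - (n:Int)) e) (b - 1) with h | h <;>
                simp [h] <;> omega
            rw [hc]
          | false =>
            simp only [Bool.false_eq_true, if_false]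
            rw [hi]
            rw [IH s b (cand ++ [d]) out' hout']
            congr 1
            apply List.filterMap_congr
            intro e _
            have h1 : sCnt ns i (d :: e) = sCnt ns (i+1) e := by
              simp [sCnt, hstr]
            have h2 : bCnt ns i (d :: e) = bCnt ns (i+1) e := by
              simp [bCnt, hstr, hin]
            rw [hi] at h1 h2
            rw [h1, h2, harr e]
      rw [hblock out houtd]
      rw [ih hnd]
      · simp
      · -- invariant for the extended accumulator
        intro x hx d' hd'
        rcases List.mem_append.mp hx with hx | hx
        · exact hout x hx d' (List.mem_cons_of_mem d hd')
        · obtain ⟨e, _, hfe⟩ := List.mem_filterMap.mp hx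
          by_cases hce : (sCnt ns i (d :: e) == s && bCnt ns i (d :: e) == b) = true
          · rw [if_pos hce] at hfe
            obtain rfl := Option.some_injective _ hfe
            intro hpre
            have hpre' := (List.prefix_append_right_inj cand).mp hpre
            rw [List.cons_prefix_cons] at hpre'
            exact hdds (hpre'.1 ▸ hd')
          · rw [if_neg hce] at hfe
            exact absurd hfe (by simp)

-- the DFS appends, in order, exactly the consistent completions of cand
lemma genRec_eq (ns : List Char) :
    ∀ (fuel : Nat) (s b : Int) (cand : List Char) (out : List (List Char)),
      (∀ x ∈ out, ¬ cand <+: x) →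
      genRec ns fuel (3 - (fuel : Int)) s b cand out =
        out ++ (extsB cand fuel).filterMap (fun e =>
          if sCnt ns (3 - (fuel : Int)) e == s && bCnt ns (3 - (fuel : Int)) e == b
          then some (cand ++ e) else none) := by
  intro fuel
  induction fuel with
  | zero =>
    intro s b cand out hout
    have hnotmem : cand ∉ out := fun hm => hout cand hm (List.prefix_refl cand)
    simp only [Nat.cast_zero, sub_zero, extsB, List.filterMap, sCnt, bCnt]
    rw [genRec]
    by_cases hs : (s < 0 || b < 0) = true
    · rw [if_pos hs]
      simp only [Bool.or_eq_true, decide_eq_true_eq] at hs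
      have : (((0:Int) == s) && ((0:Int) == b)) = false := by
        simp [beq_iff_eq]; omega
      simp [this]
    · rw [if_neg hs]
      simp only [show ((3:Int) == 3) = true from rfl, if_true]
      by_cases h0 : (((0:Int) == s) && ((0:Int) == b)) = true
      · have hsb : s = 0 ∧ b = 0 := by
          simp only [Bool.and_eq_true, beq_iff_eq] at h0; omega
        simp [hsb.1, hsb.2, PySem.Set.add, hnotmem]
      · simp only [Bool.and_eq_true, beq_iff_eq] at h0
        have h1 : ((s == 0) && (b == 0)) = false := by
          rcases Bool.eq_false_or_eq_true ((s == 0) && (b == 0)) with h | h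
          · simp only [Bool.and_eq_true, beq_iff_eq] at h; omega
          · exact h
        have h2 : (((0:Int) == s) && ((0:Int) == b)) = false := by
          rcases Bool.eq_false_or_eq_true (((0:Int) == s) && ((0:Int) == b)) with h | h
          · simp only [Bool.and_eq_true, beq_iff_eq] at h; omega
          · exact h
        simp [h1, h2]
  | succ n IH =>
    intro s b cand out hout
    rw [genRec]
    by_cases hs : (s < 0 || b < 0) = true
    · rw [if_pos hs]
      simp only [Bool.or_eq_true, decide_eq_true_eq] at hs
      have : (extsB cand (n+1)).filterMap (fun e =>
          if sCnt ns (3 - ((n:Int)+1)) e == s && bCnt ns (3 - ((n:Int)+1)) e == b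
          then some (cand ++ e) else none) = [] := by
        rw [List.filterMap_eq_nil_iff]
        intro e _
        have := sCnt_nonneg ns e (3 - ((n:Int)+1))
        have := bCnt_nonneg ns e (3 - ((n:Int)+1))
        have : (sCnt ns (3 - ((n:Int)+1)) e == s && bCnt ns (3 - ((n:Int)+1)) e == b) = false := by
          rcases Bool.eq_false_or_eq_true
            (sCnt ns (3 - ((n:Int)+1)) e == s && bCnt ns (3 - ((n:Int)+1)) e == b) with h | h
          · simp only [Bool.and_eq_true, beq_iff_eq] at h; omega
          · exact h
        simp [this]
      push_cast
      push_cast at this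
      rw [this]
      simp
    · rw [if_neg hs]
      have hne : ((3 - (((n:Nat)+1 : Nat) : Int)) == (3:Int)) = false := by
        simp only [beq_eq_false_iff_ne, ne_eq]
        push_cast
        omega
      simp only [hne, Bool.false_eq_true, if_false]
      have hi : (3 - (((n:Nat)+1 : Nat):Int)) + 1 = 3 - (n:Int) := by push_cast; omega
      rw [foldGen ns n _ hi IH s b cand digitsB (by decide) out
        (fun x hx d _ hpre => hout x hx ((List.prefix_append cand [d]).trans hpre))]
      congr 1
      simp only [extsB, List.filterMap_flatMap]
      apply List.flatMap_congr
      intro d _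
      cases hdc : PySem.Chars.isIn [d] cand with
      | true => simp
      | false => simp [List.filterMap_map, Function.comp]

-- A reduced to a count over the explicit candidate list
def candListA : List (List Char) :=
  ((PySem.List.pyRange 123 988 1).filter
    (fun answer =>
      !(PySem.Chars.isIn ['0'] (PySem.Int.toChars answer)
        || !(PySem.Set.len (PySem.Set.ofList (PySem.Int.toChars answer)) == 3)))).map
    PySem.Int.toChars

lemma filterMap_if_eq_filter {α : Type} (l : List α) (p : α → Bool) :
    l.filterMap (fun e => if p e then some e else none) = l.filter p := by
  induction l with
  | nil => rfl
  | cons a l ih => by_cases h : p a <;> simp [h, ih]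

lemma baseball_eq_countP (hints : List (Int × Int × Int)) :
    baseball hints = (candListA.countP (fun cand => hintLoopA cand hints) : Int) := by
  simp only [baseball]
  rw [show (fun (count : List Int) (answer : Int) =>
        if PySem.Chars.isIn ['0'] (PySem.Int.toChars answer)
            || !(PySem.Set.len (PySem.Set.ofList (PySem.Int.toChars answer)) == 3) then count
        else if hintLoopA (PySem.Int.toChars answer) hints then count ++ [answer] else count)
      = (fun (count : List Int) (answer : Int) =>
        if (!(PySem.Chars.isIn ['0'] (PySem.Int.toChars answer)
            || !(PySem.Set.len (PySem.Set.ofList (PySem.Int.toChars answer)) == 3)))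
            && hintLoopA (PySem.Int.toChars answer) hints then count ++ [answer] else count)
      from by
        funext cs a
        by_cases h1 : (PySem.Chars.isIn ['0'] (PySem.Int.toChars a)
            || !(PySem.Set.len (PySem.Set.ofList (PySem.Int.toChars a)) == 3)) = true <;>
          by_cases h2 : hintLoopA (PySem.Int.toChars a) hints = true <;>
            simp [h2] <;> split_ifs <;> simp_all]
  rw [PySem.List.foldl_append_if_eq_filter]
  simp only [List.nil_append, PySem.List.len_eq, Nat.cast_inj]
  rw [← List.countP_eq_length_filter, candListA, List.countP_map, List.countP_filter]
  apply List.countP_congr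
  intro a _
  simp [Function.comp, Bool.and_comm]

set_option maxRecDepth 10000 in
lemma candListA_eq_candE : candListA = candE := by decide

-- the set a single hint generates, as a filter of the common candidate list
lemma S_eq (h : Int × Int × Int) :
    genRec (PySem.Int.toChars h.1) 3 0 h.2.1 h.2.2 [] PySem.Set.empty = candE.filter (predB h) := by
  have := genRec_eq (PySem.Int.toChars h.1) 3 h.2.1 h.2.2 [] [] (by simp)
  rw [show (3 - ((3:Nat):Int)) = 0 from by norm_num] at this
  simp only [List.nil_append] at this
  show genRec (PySem.Int.toChars h.1) 3 0 h.2.1 h.2.2 [] [] = _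
  rw [this, candE]
  exact filterMap_if_eq_filter _ (predB h)

lemma inter_filter (E : List (List Char)) (p q : List Char → Bool) :
    PySem.Set.inter (E.filter p) (E.filter q) = E.filter (fun e => p e && q e) := by
  simp only [PySem.Set.inter, List.filter_filter]
  apply List.filter_congr
  intro e he
  cases hp : p e <;> cases hq : q e <;>
    simp [List.mem_filter, he, hq]

lemma countP_eq_zero_of_filter_nil (E : List (List Char)) (p q : List Char → Bool)
    (hnil : E.filter p = [] ) (himp : ∀ e, q e = true → p e = true) :
    E.countP q = 0 := by
  rw [List.countP_eq_zero]
  intro e he hq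
  have : e ∈ E.filter p := List.mem_filter.mpr ⟨he, himp e hq⟩
  simp [hnil] at this

lemma altLoop_some : ∀ (t : List (Int × Int × Int)) (p : List Char → Bool),
    altLoop t (some (candE.filter p))
      = (candE.countP (fun e => p e && t.all (fun h => predB h e)) : Int) := by
  intro t
  induction t with
  | nil =>
    intro p
    simp only [altLoop, PySem.Set.len, List.countP_eq_length_filter, Nat.cast_inj]
    congr 1
    apply List.filter_congr
    intro e _
    simp
  | cons h t ih =>
    intro p
    simp only [altLoop, S_eq h, inter_filter]
    cases hemp : (candE.filter fun e => p e && predB h e).isEmpty with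
    | true =>
      rw [if_pos rfl]
      rw [List.isEmpty_iff] at hemp
      rw [countP_eq_zero_of_filter_nil candE _ _ hemp
        (fun e hq => by
          simp only [Bool.and_eq_true, List.all_cons] at hq ⊢
          exact ⟨hq.1, hq.2.1⟩)]
      rfl
    | false =>
      rw [if_neg (by simp)]
      rw [ih]
      congr 1
      apply List.countP_congr
      intro e _
      simp [Bool.and_assoc]

set_option maxRecDepth 10000 in
lemma baseball_alt_eq_countP (hints : List (Int × Int × Int)) :
    baseball_alt hints = (candE.countP (fun e => hints.all (fun h => predB h e)) : Int) := by
  cases hints with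
  | nil => decide
  | cons h t =>
    show altLoop (h :: t) none = _
    simp only [altLoop, S_eq h]
    cases hemp : (candE.filter (predB h)).isEmpty with
    | true =>
      rw [if_pos rfl]
      rw [List.isEmpty_iff] at hemp
      rw [countP_eq_zero_of_filter_nil candE _ _ hemp
        (fun e hq => by
          simp only [List.all_cons, Bool.and_eq_true] at hq
          exact hq.1)]
      rfl
    | false =>
      rw [if_neg (by simp)]
      rw [show candE.filter (predB h) = candE.filter (fun e => predB h e) from rfl, altLoop_some]
      exact congrArg _ (List.countP_congr (fun e _ => by simp))

lemma length_mem_extsB : ∀ (n : Nat) (cand e : List Char), e ∈ extsB cand n → e.length = n := by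
  intro n
  induction n with
  | zero => intro cand e he; simp [extsB] at he; simp [he]
  | succ n ih =>
    intro cand e he
    simp only [extsB, List.mem_flatMap] at he
    obtain ⟨d, _, he⟩ := he
    cases hd : PySem.Chars.isIn [d] cand with
    | true => simp [hd] at he
    | false =>
      simp only [hd, Bool.false_eq_true, if_false, List.mem_map] at he
      obtain ⟨e', he', rfl⟩ := he
      simp [ih _ _ he']

lemma strikeCnt_eq (ns : List Char) (a b c : Char) :
    strikeLoopA [a, b, c] ns = sCnt ns 0 [a, b, c] := by
  have h0 : PySem.List.pyGet? [a, b, c] (0 : Int) = some a := rfl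
  have h1 : PySem.List.pyGet? [a, b, c] (1 : Int) = some b := rfl
  have h2 : PySem.List.pyGet? [a, b, c] (2 : Int) = some c := rfl
  have hr : PySem.List.pyRange 0 3 1 = [0, 1, 2] := rfl
  simp only [strikeLoopA, sCnt, hr, List.foldl, h0, h1, h2]
  norm_num
  split_ifs <;> omega

lemma ballCnt_eq (ns : List Char) (a b c : Char) :
    ballLoopA [a, b, c] ns = bCnt ns 0 [a, b, c] := by
  have h0 : PySem.List.pyGet? [a, b, c] (0 : Int) = some a := rfl
  have h1 : PySem.List.pyGet? [a, b, c] (1 : Int) = some b := rfl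
  have h2 : PySem.List.pyGet? [a, b, c] (2 : Int) = some c := rfl
  have hr : PySem.List.pyRange 0 3 1 = [0, 1, 2] := rfl
  simp only [ballLoopA, bCnt, hr, List.foldl, h0, h1, h2]
  norm_num
  split_ifs <;> omega

lemma hintLoop_eq_all (hints : List (Int × Int × Int)) (a b c : Char) :
    hintLoopA [a, b, c] hints = hints.all (fun h => predB h [a, b, c]) := by
  induction hints with
  | nil => rfl
  | cons h t ih =>
    obtain ⟨n, s, bl⟩ := h
    simp only [hintLoopA, List.all_cons, ih, predB, strikeCnt_eq, ballCnt_eq]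
    by_cases hs : sCnt (PySem.Int.toChars n) 0 [a, b, c] = s <;>
      by_cases hb : bCnt (PySem.Int.toChars n) 0 [a, b, c] = bl <;>
        simp [hs, hb]

-- ===== VERDICT (by name: the statement is the Claim_ definition above) =====
theorem baseball_spec : Claim_equal_baseball := by
  intro hints _ _
  unfold Spec_baseball
  rw [baseball_eq_countP, baseball_alt_eq_countP, candListA_eq_candE]
  congr 1
  apply List.countP_congr
  intro e he
  have hlen := length_mem_extsB 3 [] e he
  match e, hlen with
  | [a, b, c], _ => exact iff_of_eq (congrArg (· = true) (hintLoop_eq_all hints a b c))
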